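-- pv_equiv track=rewrite | github.com/Digital-AI-Finance/data-science | archived_scripts/final_extract_charts.py | color_replace
-- ===== SOURCE A (Python) =====
-- def color_replace(code):
--     """Replace old color hex values with course color variables"""
--     replacements = [
--         ("'#9B7EBD'", "COLOR_PRIMARY"),
--         ("'#6B5B95'", "COLOR_SECONDARY"),
--         ("'#4A90E2'", "COLOR_ACCENT"),
--         ("'#ADADE0'", "COLOR_LIGHT"),
--         ("'#44A05B'", "COLOR_GREEN"),
--     ]
--
--     for old, new in replacements:
--         code = code.replace(old, new)
--
--     return code
-- ===== SOURCE B (Python) =====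
-- def color_replace(code):
--     """Replace old color hex values with course color variables (single pass)"""
--     table = {
--         "'#9B7EBD'": "COLOR_PRIMARY",
--         "'#6B5B95'": "COLOR_SECONDARY",
--         "'#4A90E2'": "COLOR_ACCENT",
--         "'#ADADE0'": "COLOR_LIGHT",
--         "'#44A05B'": "COLOR_GREEN",
--     }
--     out = []
--     i = 0
--     n = len(code)
--     while i < n:
--         chunk = code[i:i + 9]          # every key has length 9
--         if chunk in table:
--             out.append(table[chunk])
--             i += 9
--         else:
--             out.append(code[i])
--             i += 1
--     return ''.join(out)
-- ===== Notes on version B (the rewrite author's own statement) =====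
-- stated objective: alternative
-- what changed: Replaces A's five sequential full-string replace passes by one left-to-right scan with a dict keyed on the 9-character chunk at the cursor, emitting pieces into a list joined once.
-- outside the precondition, e.g. on color_replace("'#6B5B95'#9B7EBD'"): A returns "'#6B5B95COLOR_PRIMARY", B returns "COLOR_SECONDARY#9B7EBD'"
import Mathlib
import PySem

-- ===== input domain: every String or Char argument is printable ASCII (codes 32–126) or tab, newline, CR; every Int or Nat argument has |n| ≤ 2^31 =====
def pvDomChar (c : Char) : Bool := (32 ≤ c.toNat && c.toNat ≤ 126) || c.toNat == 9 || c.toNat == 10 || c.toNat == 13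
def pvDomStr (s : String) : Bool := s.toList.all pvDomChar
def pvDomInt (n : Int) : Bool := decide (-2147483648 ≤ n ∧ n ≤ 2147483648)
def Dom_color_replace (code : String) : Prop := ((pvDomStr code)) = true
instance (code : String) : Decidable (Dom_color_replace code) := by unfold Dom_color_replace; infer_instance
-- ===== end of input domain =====

-- B replaces A's five sequential str.replace passes with one left-to-right scan using a
-- dict keyed on the 9-character chunk at the cursor (objective: alternative single-pass algorithm).

-- ===== PORT A =====
-- A: a loop over the replacement pairs, each doing a full str.replace pass.
def color_replace (code : String) : String :=
  [("'#9B7EBD'", "COLOR_PRIMARY"),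
   ("'#6B5B95'", "COLOR_SECONDARY"),
   ("'#4A90E2'", "COLOR_ACCENT"),
   ("'#ADADE0'", "COLOR_LIGHT"),
   ("'#44A05B'", "COLOR_GREEN")].foldl
    (fun c p => PySem.Str.replace c p.1 p.2) code

-- ===== PORT B =====
-- B-side helpers: the literal dict `table` of Source B (five distinct 9-char keys),
-- ported as a first-match lookup over its five entries ('chunk in table' / 'table[chunk]').
def pvK1 : List Char := "'#9B7EBD'".toList
def pvK2 : List Char := "'#6B5B95'".toList
def pvK3 : List Char := "'#4A90E2'".toList
def pvK4 : List Char := "'#ADADE0'".toList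
def pvK5 : List Char := "'#44A05B'".toList
def pvV1 : List Char := "COLOR_PRIMARY".toList
def pvV2 : List Char := "COLOR_SECONDARY".toList
def pvV3 : List Char := "COLOR_ACCENT".toList
def pvV4 : List Char := "COLOR_LIGHT".toList
def pvV5 : List Char := "COLOR_GREEN".toList

def pvLookup (chunk : List Char) : Option (List Char) :=
  if chunk = pvK1 then some pvV1
  else if chunk = pvK2 then some pvV2
  else if chunk = pvK3 then some pvV3
  else if chunk = pvK4 then some pvV4
  else if chunk = pvK5 then some pvV5
  else none

-- the while loop of Source B: chunk = code[i:i+9]; on a hit emit the value and advance 9, else copy one char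
def fuseGo (l : List Char) : List Char :=
  match l with
  | [] => []
  | c :: t =>
    match pvLookup ((c :: t).take 9) with
    | some r => r ++ fuseGo ((c :: t).drop 9)
    | none => c :: fuseGo t
termination_by l.length
decreasing_by all_goals simp

def color_replace_alt (code : String) : String := String.ofList (fuseGo code.toList)

-- ===== PRECONDITION & SPEC =====
-- Pre_ excludes inputs in which the closing quote of one color literal is simultaneously the
-- opening quote of an earlier-listed (higher-priority) color literal: on such overlaps A's
-- cascaded sequential replaces and B's single left-to-right pass are both defensible readings.
def pvOverlaps : List String :=
  ["'#6B5B95'#9B7EBD'",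
   "'#4A90E2'#9B7EBD'", "'#4A90E2'#6B5B95'",
   "'#ADADE0'#9B7EBD'", "'#ADADE0'#6B5B95'", "'#ADADE0'#4A90E2'",
   "'#44A05B'#9B7EBD'", "'#44A05B'#6B5B95'", "'#44A05B'#4A90E2'", "'#44A05B'#ADADE0'"]

def Pre_color_replace (code : String) : Prop :=
  ∀ o ∈ pvOverlaps, PySem.Str.isIn o code = false
instance (code : String) : Decidable (Pre_color_replace code) := by
  unfold Pre_color_replace; infer_instance

def pvWitness_color_replace : String := "plt.plot(x, color='#9B7EBD')"

def Spec_color_replace (code : String) (out : String) : Prop := out = color_replace_alt code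
instance (code : String) (out : String) : Decidable (Spec_color_replace code out) := by
  unfold Spec_color_replace; infer_instance

-- ===== CLAIM (what is proved, stated in full; the proofs are below) =====
def Claim_equal_color_replace : Prop := ∀ (code : String), Dom_color_replace code → Pre_color_replace code → Spec_color_replace code (color_replace code)

-- ===== LEMMAS AND PROOFS =====

-- A clean structural form of CPython's str.replace (old nonempty): leftmost non-overlapping.
def pvRep (q : Char) (qs R : List Char) : List Char → List Char
  | [] => []
  | c :: t =>
    if (q :: qs).isPrefixOf (c :: t) then R ++ pvRep q qs R (t.drop qs.length)
    else c :: pvRep q qs R t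
termination_by l => l.length
decreasing_by all_goals simp

lemma pvRep_go_eq (q : Char) (qs R : List Char) :
    ∀ (fuel : Nat) (l acc : List Char), l.length ≤ fuel →
      PySem.Chars.replace.go (q :: qs) R fuel l acc = acc.reverse ++ pvRep q qs R l := by
  intro fuel
  induction fuel with
  | zero =>
    intro l acc hl
    have hnil : l = [] := by cases l with | nil => rfl | cons c t => simp at hl
    subst hnil
    simp [PySem.Chars.replace.go, pvRep]
  | succ fuel ih =>
    intro l acc hl
    cases l with
    | nil => simp [PySem.Chars.replace.go, pvRep]
    | cons c t =>
      rw [PySem.Chars.replace.go]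
      by_cases hp : (q :: qs).isPrefixOf (c :: t)
      · rw [if_pos hp]
        have hdrop : (c :: t).drop (q :: qs).length = t.drop qs.length := by simp
        have hlen : (t.drop qs.length).length ≤ fuel := by
          simp only [List.length_drop]
          have := Nat.succ_le_succ_iff.1 hl
          omega
        rw [hdrop, ih (t.drop qs.length) (R.reverse ++ acc) hlen]
        rw [pvRep, if_pos hp]
        simp
      · rw [if_neg hp]
        have hlen : t.length ≤ fuel := Nat.succ_le_succ_iff.1 hl
        rw [ih t (c :: acc) hlen, pvRep, if_neg hp]
        simp

lemma pvReplace_eq (q : Char) (qs R l : List Char) :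
    PySem.Chars.replace l (q :: qs) R = pvRep q qs R l := by
  rw [PySem.Chars.replace, if_neg (by simp)]
  simpa using pvRep_go_eq q qs R l.length l [] le_rfl

lemma pvRep_cons_neg {q : Char} {qs R t : List Char} {c : Char}
    (h : ¬ (q :: qs) <+: (c :: t)) :
    pvRep q qs R (c :: t) = c :: pvRep q qs R t := by
  rw [pvRep, if_neg (by simpa [List.isPrefixOf_iff_prefix] using h)]

lemma pvRep_match_block (q : Char) (qs R X : List Char) :
    pvRep q qs R ((q :: qs) ++ X) = R ++ pvRep q qs R X := by
  rw [List.cons_append, pvRep,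
    if_pos (List.isPrefixOf_iff_prefix.2
      (List.cons_prefix_cons.2 ⟨rfl, List.prefix_append qs X⟩)),
    List.drop_left]

lemma pvRep_append_left {q : Char} {qs R : List Char} (a X : List Char) (hq : q ∉ a) :
    pvRep q qs R (a ++ X) = a ++ pvRep q qs R X := by
  induction a with
  | nil => simp
  | cons x a ih =>
    have hni : ¬ (q :: qs) <+: (x :: (a ++ X)) := by
      intro hp
      rcases List.cons_prefix_cons.1 hp with ⟨h1, -⟩
      exact hq (by simp [h1])
    rw [List.cons_append, pvRep_cons_neg hni,
      ih (fun hm => hq (List.mem_cons_of_mem _ hm)), List.cons_append]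

lemma pvRep_skip (q : Char) (qs R : List Char) (n : Nat) :
    ∀ l : List Char, (∀ k, k < n → ¬ (q :: qs) <+: l.drop k) →
      pvRep q qs R l = l.take n ++ pvRep q qs R (l.drop n) := by
  induction n with
  | zero => intro l _; simp
  | succ n ih =>
    intro l h
    cases l with
    | nil => simp
    | cons c t =>
      have h0 : ¬ (q :: qs) <+: (c :: t) := by simpa using h 0 (Nat.succ_pos n)
      rw [pvRep_cons_neg h0,
        ih t (fun k hk => by simpa using h (k + 1) (by omega))]
      simp

lemma pvRep_pull (q : Char) (qs R : List Char) (hR : R.head? = some 'C') :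
    ∀ (n : Nat) (l s : List Char), l.length ≤ n → s ≠ [] → 'C' ∉ s →
      s <+: pvRep q qs R l → s <+: l := by
  intro n
  induction n with
  | zero =>
    intro l s hl hs _ hp
    have hnil : l = [] := by cases l with | nil => rfl | cons c t => simp at hl
    subst hnil
    simp [pvRep] at hp
    exact absurd hp hs
  | succ n ih =>
    intro l s hl hs hC hp
    cases l with
    | nil =>
      simp [pvRep] at hp
      exact absurd hp hs
    | cons c t =>
      by_cases hpre : (q :: qs).isPrefixOf (c :: t)
      · exfalso
        rw [pvRep, if_pos hpre] at hp
        obtain ⟨R', rfl⟩ : ∃ R', R = 'C' :: R' := by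
          cases R with
          | nil => simp at hR
          | cons a R' => exact ⟨R', by simpa using hR⟩
        rw [List.cons_append] at hp
        cases s with
        | nil => exact hs rfl
        | cons sh st =>
          rcases List.cons_prefix_cons.1 hp with ⟨rfl, -⟩
          exact hC (by simp)
      · rw [pvRep_cons_neg (by simpa [List.isPrefixOf_iff_prefix] using hpre)] at hp
        cases s with
        | nil => exact absurd rfl hs
        | cons sh st =>
          obtain ⟨rfl, hst⟩ := List.cons_prefix_cons.1 hp
          refine List.cons_prefix_cons.2 ⟨rfl, ?_⟩
          cases st with
          | nil => exact List.nil_prefix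
          | cons a u =>
            exact ih t (a :: u) (Nat.succ_le_succ_iff.1 hl) (by simp)
              (fun hm => hC (List.mem_cons_of_mem _ hm)) hst

lemma pv_not_prefix_len_eq (A B X : List Char) (h : A.length = B.length) (hne : A ≠ B) :
    ¬ A <+: (B ++ X) := by
  intro hp
  apply hne
  have hA := List.prefix_iff_eq_take.1 hp
  rw [h] at hA
  rw [hA, List.take_left]

lemma pvRep_skip_block (q : Char) (qs R P X : List Char)
    (hP9 : P.length = 9)
    (h0 : ¬ (q :: qs) <+: (P ++ X))
    (hmid : ∀ k, 1 ≤ k → k ≤ 7 → (P.drop k).head? ≠ some q)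
    (h8 : P.drop 8 = [q])
    (hX : ¬ qs <+: X) :
    pvRep q qs R (P ++ X) = P ++ pvRep q qs R X := by
  have hcond : ∀ k, k < 9 → ¬ (q :: qs) <+: (P ++ X).drop k := by
    intro k hk
    rcases Nat.lt_or_ge k 8 with hk8 | hk8
    · rcases Nat.eq_zero_or_pos k with rfl | hk0
      · simpa using h0
      · rw [List.drop_append_of_le_length (by omega)]
        intro hp
        have hlen : (P.drop k).length = 9 - k := by simp [hP9]
        cases hPd : P.drop k with
        | nil => rw [hPd] at hlen; simp at hlen; omega
        | cons y ys =>
          rw [hPd, List.cons_append] at hp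
          obtain ⟨hqy, -⟩ := List.cons_prefix_cons.1 hp
          exact hmid k hk0 (by omega) (by rw [hPd, hqy]; rfl)
    · have hk8' : k = 8 := by omega
      subst hk8'
      rw [List.drop_append_of_le_length (by omega), h8]
      intro hp
      exact hX (by simpa using hp)
  rw [pvRep_skip q qs R 9 _ hcond, List.take_left' hP9, List.drop_left' hP9]

-- concrete pattern tails (the 8 chars after the opening quote)
def pvQ1 : List Char := "#9B7EBD'".toList
def pvQ2 : List Char := "#6B5B95'".toList
def pvQ3 : List Char := "#4A90E2'".toList
def pvQ4 : List Char := "#ADADE0'".toList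
def pvQ5 : List Char := "#44A05B'".toList

def pvRep1 (l : List Char) : List Char := pvRep '\'' pvQ1 pvV1 l
def pvRep2 (l : List Char) : List Char := pvRep '\'' pvQ2 pvV2 l
def pvRep3 (l : List Char) : List Char := pvRep '\'' pvQ3 pvV3 l
def pvRep4 (l : List Char) : List Char := pvRep '\'' pvQ4 pvV4 l
def pvRep5 (l : List Char) : List Char := pvRep '\'' pvQ5 pvV5 l
def pvA5 (l : List Char) : List Char := pvRep5 (pvRep4 (pvRep3 (pvRep2 (pvRep1 l))))

lemma pvKQ1 : pvK1 = '\'' :: pvQ1 := by decide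
lemma pvKQ2 : pvK2 = '\'' :: pvQ2 := by decide
lemma pvKQ3 : pvK3 = '\'' :: pvQ3 := by decide
lemma pvKQ4 : pvK4 = '\'' :: pvQ4 := by decide
lemma pvKQ5 : pvK5 = '\'' :: pvQ5 := by decide

-- A's port, on the char-list side, is the five-pass cascade
lemma portA_toList (code : String) : (color_replace code).toList = pvA5 code.toList := by
  simp only [color_replace, List.foldl_cons, List.foldl_nil, PySem.Str.toList_replace]
  rw [show ("'#9B7EBD'" : String).toList = '\'' :: pvQ1 from by decide,
    show ("'#6B5B95'" : String).toList = '\'' :: pvQ2 from by decide,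
    show ("'#4A90E2'" : String).toList = '\'' :: pvQ3 from by decide,
    show ("'#ADADE0'" : String).toList = '\'' :: pvQ4 from by decide,
    show ("'#44A05B'" : String).toList = '\'' :: pvQ5 from by decide]
  simp only [pvReplace_eq]
  rfl

-- pulling a prefix containing no 'C' back through one replace pass
lemma pvPull1 {l s : List Char} (hs : s ≠ []) (hC : 'C' ∉ s) (h : s <+: pvRep1 l) : s <+: l :=
  pvRep_pull '\'' pvQ1 pvV1 (by decide) l.length l s le_rfl hs hC h
lemma pvPull2 {l s : List Char} (hs : s ≠ []) (hC : 'C' ∉ s) (h : s <+: pvRep2 l) : s <+: l :=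
  pvRep_pull '\'' pvQ2 pvV2 (by decide) l.length l s le_rfl hs hC h
lemma pvPull3 {l s : List Char} (hs : s ≠ []) (hC : 'C' ∉ s) (h : s <+: pvRep3 l) : s <+: l :=
  pvRep_pull '\'' pvQ3 pvV3 (by decide) l.length l s le_rfl hs hC h
lemma pvPull4 {l s : List Char} (hs : s ≠ []) (hC : 'C' ∉ s) (h : s <+: pvRep4 l) : s <+: l :=
  pvRep_pull '\'' pvQ4 pvV4 (by decide) l.length l s le_rfl hs hC h

-- no quote strictly inside a pattern's first 8 chars

lemma pvMid2 : ∀ k, 1 ≤ k → k ≤ 7 → (pvK2.drop k).head? ≠ some '\'' := by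
  intro k h1 h7; interval_cases k <;> decide
lemma pvMid3 : ∀ k, 1 ≤ k → k ≤ 7 → (pvK3.drop k).head? ≠ some '\'' := by
  intro k h1 h7; interval_cases k <;> decide
lemma pvMid4 : ∀ k, 1 ≤ k → k ≤ 7 → (pvK4.drop k).head? ≠ some '\'' := by
  intro k h1 h7; interval_cases k <;> decide
lemma pvMid5 : ∀ k, 1 ≤ k → k ≤ 7 → (pvK5.drop k).head? ≠ some '\'' := by
  intro k h1 h7; interval_cases k <;> decide

-- a pass whose pattern does not start inside the 9-char block copies the block
lemma pvSkip_1_2 (Y : List Char) (hY : ¬ pvQ1 <+: Y) : pvRep1 (pvK2 ++ Y) = pvK2 ++ pvRep1 Y :=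
  pvRep_skip_block '\'' pvQ1 pvV1 pvK2 Y (by decide)
    (pv_not_prefix_len_eq _ _ _ (by decide) (by decide)) pvMid2 (by decide) hY
lemma pvSkip_1_3 (Y : List Char) (hY : ¬ pvQ1 <+: Y) : pvRep1 (pvK3 ++ Y) = pvK3 ++ pvRep1 Y :=
  pvRep_skip_block '\'' pvQ1 pvV1 pvK3 Y (by decide)
    (pv_not_prefix_len_eq _ _ _ (by decide) (by decide)) pvMid3 (by decide) hY
lemma pvSkip_2_3 (Y : List Char) (hY : ¬ pvQ2 <+: Y) : pvRep2 (pvK3 ++ Y) = pvK3 ++ pvRep2 Y :=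
  pvRep_skip_block '\'' pvQ2 pvV2 pvK3 Y (by decide)
    (pv_not_prefix_len_eq _ _ _ (by decide) (by decide)) pvMid3 (by decide) hY
lemma pvSkip_1_4 (Y : List Char) (hY : ¬ pvQ1 <+: Y) : pvRep1 (pvK4 ++ Y) = pvK4 ++ pvRep1 Y :=
  pvRep_skip_block '\'' pvQ1 pvV1 pvK4 Y (by decide)
    (pv_not_prefix_len_eq _ _ _ (by decide) (by decide)) pvMid4 (by decide) hY
lemma pvSkip_2_4 (Y : List Char) (hY : ¬ pvQ2 <+: Y) : pvRep2 (pvK4 ++ Y) = pvK4 ++ pvRep2 Y :=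
  pvRep_skip_block '\'' pvQ2 pvV2 pvK4 Y (by decide)
    (pv_not_prefix_len_eq _ _ _ (by decide) (by decide)) pvMid4 (by decide) hY
lemma pvSkip_3_4 (Y : List Char) (hY : ¬ pvQ3 <+: Y) : pvRep3 (pvK4 ++ Y) = pvK4 ++ pvRep3 Y :=
  pvRep_skip_block '\'' pvQ3 pvV3 pvK4 Y (by decide)
    (pv_not_prefix_len_eq _ _ _ (by decide) (by decide)) pvMid4 (by decide) hY
lemma pvSkip_1_5 (Y : List Char) (hY : ¬ pvQ1 <+: Y) : pvRep1 (pvK5 ++ Y) = pvK5 ++ pvRep1 Y :=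
  pvRep_skip_block '\'' pvQ1 pvV1 pvK5 Y (by decide)
    (pv_not_prefix_len_eq _ _ _ (by decide) (by decide)) pvMid5 (by decide) hY
lemma pvSkip_2_5 (Y : List Char) (hY : ¬ pvQ2 <+: Y) : pvRep2 (pvK5 ++ Y) = pvK5 ++ pvRep2 Y :=
  pvRep_skip_block '\'' pvQ2 pvV2 pvK5 Y (by decide)
    (pv_not_prefix_len_eq _ _ _ (by decide) (by decide)) pvMid5 (by decide) hY
lemma pvSkip_3_5 (Y : List Char) (hY : ¬ pvQ3 <+: Y) : pvRep3 (pvK5 ++ Y) = pvK5 ++ pvRep3 Y :=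
  pvRep_skip_block '\'' pvQ3 pvV3 pvK5 Y (by decide)
    (pv_not_prefix_len_eq _ _ _ (by decide) (by decide)) pvMid5 (by decide) hY
lemma pvSkip_4_5 (Y : List Char) (hY : ¬ pvQ4 <+: Y) : pvRep4 (pvK5 ++ Y) = pvK5 ++ pvRep4 Y :=
  pvRep_skip_block '\'' pvQ4 pvV4 pvK5 Y (by decide)
    (pv_not_prefix_len_eq _ _ _ (by decide) (by decide)) pvMid5 (by decide) hY

-- the matching pass rewrites its own block
lemma pvMatch_1 (Y : List Char) : pvRep1 (pvK1 ++ Y) = pvV1 ++ pvRep1 Y := by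
  rw [pvKQ1]; exact pvRep_match_block '\'' pvQ1 pvV1 Y
lemma pvMatch_2 (Y : List Char) : pvRep2 (pvK2 ++ Y) = pvV2 ++ pvRep2 Y := by
  rw [pvKQ2]; exact pvRep_match_block '\'' pvQ2 pvV2 Y
lemma pvMatch_3 (Y : List Char) : pvRep3 (pvK3 ++ Y) = pvV3 ++ pvRep3 Y := by
  rw [pvKQ3]; exact pvRep_match_block '\'' pvQ3 pvV3 Y
lemma pvMatch_4 (Y : List Char) : pvRep4 (pvK4 ++ Y) = pvV4 ++ pvRep4 Y := by
  rw [pvKQ4]; exact pvRep_match_block '\'' pvQ4 pvV4 Y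
lemma pvMatch_5 (Y : List Char) : pvRep5 (pvK5 ++ Y) = pvV5 ++ pvRep5 Y := by
  rw [pvKQ5]; exact pvRep_match_block '\'' pvQ5 pvV5 Y

-- an excluded overlap: pattern m's tail right after pattern i's closing quote
lemma pvOv_2_1 (rest : List Char) (hno : ¬ ("'#6B5B95'#9B7EBD'" : String).toList <:+: pvK2 ++ rest) :
    ¬ pvQ1 <+: rest := by
  intro hq
  apply hno
  rw [show ("'#6B5B95'#9B7EBD'" : String).toList = "'#6B5B95".toList ++ ('\'' :: pvQ1) from by decide,
    show pvK2 ++ rest = "'#6B5B95".toList ++ ('\'' :: rest) from by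
      rw [show pvK2 = "'#6B5B95".toList ++ ['\''] from by decide, List.append_assoc, List.singleton_append]]
  exact ((List.prefix_append_right_inj _).2 (List.cons_prefix_cons.2 ⟨rfl, hq⟩)).isInfix
lemma pvOv_3_1 (rest : List Char) (hno : ¬ ("'#4A90E2'#9B7EBD'" : String).toList <:+: pvK3 ++ rest) :
    ¬ pvQ1 <+: rest := by
  intro hq
  apply hno
  rw [show ("'#4A90E2'#9B7EBD'" : String).toList = "'#4A90E2".toList ++ ('\'' :: pvQ1) from by decide,
    show pvK3 ++ rest = "'#4A90E2".toList ++ ('\'' :: rest) from by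
      rw [show pvK3 = "'#4A90E2".toList ++ ['\''] from by decide, List.append_assoc, List.singleton_append]]
  exact ((List.prefix_append_right_inj _).2 (List.cons_prefix_cons.2 ⟨rfl, hq⟩)).isInfix
lemma pvOv_3_2 (rest : List Char) (hno : ¬ ("'#4A90E2'#6B5B95'" : String).toList <:+: pvK3 ++ rest) :
    ¬ pvQ2 <+: rest := by
  intro hq
  apply hno
  rw [show ("'#4A90E2'#6B5B95'" : String).toList = "'#4A90E2".toList ++ ('\'' :: pvQ2) from by decide,
    show pvK3 ++ rest = "'#4A90E2".toList ++ ('\'' :: rest) from by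
      rw [show pvK3 = "'#4A90E2".toList ++ ['\''] from by decide, List.append_assoc, List.singleton_append]]
  exact ((List.prefix_append_right_inj _).2 (List.cons_prefix_cons.2 ⟨rfl, hq⟩)).isInfix
lemma pvOv_4_1 (rest : List Char) (hno : ¬ ("'#ADADE0'#9B7EBD'" : String).toList <:+: pvK4 ++ rest) :
    ¬ pvQ1 <+: rest := by
  intro hq
  apply hno
  rw [show ("'#ADADE0'#9B7EBD'" : String).toList = "'#ADADE0".toList ++ ('\'' :: pvQ1) from by decide,
    show pvK4 ++ rest = "'#ADADE0".toList ++ ('\'' :: rest) from by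
      rw [show pvK4 = "'#ADADE0".toList ++ ['\''] from by decide, List.append_assoc, List.singleton_append]]
  exact ((List.prefix_append_right_inj _).2 (List.cons_prefix_cons.2 ⟨rfl, hq⟩)).isInfix
lemma pvOv_4_2 (rest : List Char) (hno : ¬ ("'#ADADE0'#6B5B95'" : String).toList <:+: pvK4 ++ rest) :
    ¬ pvQ2 <+: rest := by
  intro hq
  apply hno
  rw [show ("'#ADADE0'#6B5B95'" : String).toList = "'#ADADE0".toList ++ ('\'' :: pvQ2) from by decide,
    show pvK4 ++ rest = "'#ADADE0".toList ++ ('\'' :: rest) from by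
      rw [show pvK4 = "'#ADADE0".toList ++ ['\''] from by decide, List.append_assoc, List.singleton_append]]
  exact ((List.prefix_append_right_inj _).2 (List.cons_prefix_cons.2 ⟨rfl, hq⟩)).isInfix
lemma pvOv_4_3 (rest : List Char) (hno : ¬ ("'#ADADE0'#4A90E2'" : String).toList <:+: pvK4 ++ rest) :
    ¬ pvQ3 <+: rest := by
  intro hq
  apply hno
  rw [show ("'#ADADE0'#4A90E2'" : String).toList = "'#ADADE0".toList ++ ('\'' :: pvQ3) from by decide,
    show pvK4 ++ rest = "'#ADADE0".toList ++ ('\'' :: rest) from by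
      rw [show pvK4 = "'#ADADE0".toList ++ ['\''] from by decide, List.append_assoc, List.singleton_append]]
  exact ((List.prefix_append_right_inj _).2 (List.cons_prefix_cons.2 ⟨rfl, hq⟩)).isInfix
lemma pvOv_5_1 (rest : List Char) (hno : ¬ ("'#44A05B'#9B7EBD'" : String).toList <:+: pvK5 ++ rest) :
    ¬ pvQ1 <+: rest := by
  intro hq
  apply hno
  rw [show ("'#44A05B'#9B7EBD'" : String).toList = "'#44A05B".toList ++ ('\'' :: pvQ1) from by decide,
    show pvK5 ++ rest = "'#44A05B".toList ++ ('\'' :: rest) from by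
      rw [show pvK5 = "'#44A05B".toList ++ ['\''] from by decide, List.append_assoc, List.singleton_append]]
  exact ((List.prefix_append_right_inj _).2 (List.cons_prefix_cons.2 ⟨rfl, hq⟩)).isInfix
lemma pvOv_5_2 (rest : List Char) (hno : ¬ ("'#44A05B'#6B5B95'" : String).toList <:+: pvK5 ++ rest) :
    ¬ pvQ2 <+: rest := by
  intro hq
  apply hno
  rw [show ("'#44A05B'#6B5B95'" : String).toList = "'#44A05B".toList ++ ('\'' :: pvQ2) from by decide,
    show pvK5 ++ rest = "'#44A05B".toList ++ ('\'' :: rest) from by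
      rw [show pvK5 = "'#44A05B".toList ++ ['\''] from by decide, List.append_assoc, List.singleton_append]]
  exact ((List.prefix_append_right_inj _).2 (List.cons_prefix_cons.2 ⟨rfl, hq⟩)).isInfix
lemma pvOv_5_3 (rest : List Char) (hno : ¬ ("'#44A05B'#4A90E2'" : String).toList <:+: pvK5 ++ rest) :
    ¬ pvQ3 <+: rest := by
  intro hq
  apply hno
  rw [show ("'#44A05B'#4A90E2'" : String).toList = "'#44A05B".toList ++ ('\'' :: pvQ3) from by decide,
    show pvK5 ++ rest = "'#44A05B".toList ++ ('\'' :: rest) from by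
      rw [show pvK5 = "'#44A05B".toList ++ ['\''] from by decide, List.append_assoc, List.singleton_append]]
  exact ((List.prefix_append_right_inj _).2 (List.cons_prefix_cons.2 ⟨rfl, hq⟩)).isInfix
lemma pvOv_5_4 (rest : List Char) (hno : ¬ ("'#44A05B'#ADADE0'" : String).toList <:+: pvK5 ++ rest) :
    ¬ pvQ4 <+: rest := by
  intro hq
  apply hno
  rw [show ("'#44A05B'#ADADE0'" : String).toList = "'#44A05B".toList ++ ('\'' :: pvQ4) from by decide,
    show pvK5 ++ rest = "'#44A05B".toList ++ ('\'' :: rest) from by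
      rw [show pvK5 = "'#44A05B".toList ++ ['\''] from by decide, List.append_assoc, List.singleton_append]]
  exact ((List.prefix_append_right_inj _).2 (List.cons_prefix_cons.2 ⟨rfl, hq⟩)).isInfix

-- B's scan on a matching block and on a non-matching head
lemma pvFuse_1 (rest : List Char) : fuseGo (pvK1 ++ rest) = pvV1 ++ fuseGo rest := by
  have e : pvK1 ++ rest = '\'' :: (pvQ1 ++ rest) := by rw [pvKQ1, List.cons_append]
  have htake : ('\'' :: (pvQ1 ++ rest)).take 9 = pvK1 := by
    rw [← e]; exact List.take_left' (by decide)
  have hdrop : ('\'' :: (pvQ1 ++ rest)).drop 9 = rest := by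
    rw [← e]; exact List.drop_left' (by decide)
  rw [e]
  simp only [fuseGo]
  rw [htake, show pvLookup pvK1 = some pvV1 from by decide]
  show pvV1 ++ fuseGo (('\'' :: (pvQ1 ++ rest)).drop 9) = pvV1 ++ fuseGo rest
  rw [hdrop]
lemma pvFuse_2 (rest : List Char) : fuseGo (pvK2 ++ rest) = pvV2 ++ fuseGo rest := by
  have e : pvK2 ++ rest = '\'' :: (pvQ2 ++ rest) := by rw [pvKQ2, List.cons_append]
  have htake : ('\'' :: (pvQ2 ++ rest)).take 9 = pvK2 := by
    rw [← e]; exact List.take_left' (by decide)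
  have hdrop : ('\'' :: (pvQ2 ++ rest)).drop 9 = rest := by
    rw [← e]; exact List.drop_left' (by decide)
  rw [e]
  simp only [fuseGo]
  rw [htake, show pvLookup pvK2 = some pvV2 from by decide]
  show pvV2 ++ fuseGo (('\'' :: (pvQ2 ++ rest)).drop 9) = pvV2 ++ fuseGo rest
  rw [hdrop]
lemma pvFuse_3 (rest : List Char) : fuseGo (pvK3 ++ rest) = pvV3 ++ fuseGo rest := by
  have e : pvK3 ++ rest = '\'' :: (pvQ3 ++ rest) := by rw [pvKQ3, List.cons_append]
  have htake : ('\'' :: (pvQ3 ++ rest)).take 9 = pvK3 := by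
    rw [← e]; exact List.take_left' (by decide)
  have hdrop : ('\'' :: (pvQ3 ++ rest)).drop 9 = rest := by
    rw [← e]; exact List.drop_left' (by decide)
  rw [e]
  simp only [fuseGo]
  rw [htake, show pvLookup pvK3 = some pvV3 from by decide]
  show pvV3 ++ fuseGo (('\'' :: (pvQ3 ++ rest)).drop 9) = pvV3 ++ fuseGo rest
  rw [hdrop]
lemma pvFuse_4 (rest : List Char) : fuseGo (pvK4 ++ rest) = pvV4 ++ fuseGo rest := by
  have e : pvK4 ++ rest = '\'' :: (pvQ4 ++ rest) := by rw [pvKQ4, List.cons_append]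
  have htake : ('\'' :: (pvQ4 ++ rest)).take 9 = pvK4 := by
    rw [← e]; exact List.take_left' (by decide)
  have hdrop : ('\'' :: (pvQ4 ++ rest)).drop 9 = rest := by
    rw [← e]; exact List.drop_left' (by decide)
  rw [e]
  simp only [fuseGo]
  rw [htake, show pvLookup pvK4 = some pvV4 from by decide]
  show pvV4 ++ fuseGo (('\'' :: (pvQ4 ++ rest)).drop 9) = pvV4 ++ fuseGo rest
  rw [hdrop]
lemma pvFuse_5 (rest : List Char) : fuseGo (pvK5 ++ rest) = pvV5 ++ fuseGo rest := by
  have e : pvK5 ++ rest = '\'' :: (pvQ5 ++ rest) := by rw [pvKQ5, List.cons_append]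
  have htake : ('\'' :: (pvQ5 ++ rest)).take 9 = pvK5 := by
    rw [← e]; exact List.take_left' (by decide)
  have hdrop : ('\'' :: (pvQ5 ++ rest)).drop 9 = rest := by
    rw [← e]; exact List.drop_left' (by decide)
  rw [e]
  simp only [fuseGo]
  rw [htake, show pvLookup pvK5 = some pvV5 from by decide]
  show pvV5 ++ fuseGo (('\'' :: (pvQ5 ++ rest)).drop 9) = pvV5 ++ fuseGo rest
  rw [hdrop]

lemma pvFuseMiss (c : Char) (t : List Char)
    (h1 : ¬ pvK1 <+: (c :: t)) (h2 : ¬ pvK2 <+: (c :: t)) (h3 : ¬ pvK3 <+: (c :: t)) (h4 : ¬ pvK4 <+: (c :: t)) (h5 : ¬ pvK5 <+: (c :: t)) :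
    fuseGo (c :: t) = c :: fuseGo t := by
  have hnone : pvLookup ((c :: t).take 9) = none := by
    unfold pvLookup
    rw [if_neg (fun he => h1 (List.prefix_iff_eq_take.2 (by rw [show pvK1.length = 9 from by decide]; exact he.symm))),
      if_neg (fun he => h2 (List.prefix_iff_eq_take.2 (by rw [show pvK2.length = 9 from by decide]; exact he.symm))),
      if_neg (fun he => h3 (List.prefix_iff_eq_take.2 (by rw [show pvK3.length = 9 from by decide]; exact he.symm))),
      if_neg (fun he => h4 (List.prefix_iff_eq_take.2 (by rw [show pvK4.length = 9 from by decide]; exact he.symm))),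
      if_neg (fun he => h5 (List.prefix_iff_eq_take.2 (by rw [show pvK5.length = 9 from by decide]; exact he.symm)))]
  simp only [fuseGo]
  rw [hnone]

-- the cascade and the single scan agree on overlap-free inputs
lemma pvMain : ∀ (n : Nat) (l : List Char), l.length ≤ n →
    (∀ o ∈ pvOverlaps, ¬ o.toList <:+: l) → pvA5 l = fuseGo l := by
  intro n
  induction n with
  | zero =>
    intro l hl _
    have hnil : l = [] := by cases l with | nil => rfl | cons c t => simp at hl
    subst hnil
    simp [pvA5, pvRep1, pvRep2, pvRep3, pvRep4, pvRep5, pvRep, fuseGo]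
  | succ n ih =>
    intro l hl hno
    by_cases h1 : pvK1 <+: l
    · obtain ⟨rest, rfl⟩ := h1
      have hrl : rest.length ≤ n := by
        have h9 : (pvK1 ++ rest).length = 9 + rest.length := by
          rw [List.length_append, show pvK1.length = 9 from by decide]
        omega
      have hno' : ∀ o ∈ pvOverlaps, ¬ o.toList <:+: rest := fun o ho hin =>
        hno o ho (hin.trans (List.suffix_append pvK1 rest).isInfix)
      have s1 : pvRep1 (pvK1 ++ (rest)) = pvV1 ++ pvRep1 (rest) := pvMatch_1 _
      have s2 : pvRep2 (pvV1 ++ (pvRep1 rest)) = pvV1 ++ pvRep2 (pvRep1 rest) := pvRep_append_left _ _ (by decide)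
      have s3 : pvRep3 (pvV1 ++ (pvRep2 (pvRep1 rest))) = pvV1 ++ pvRep3 (pvRep2 (pvRep1 rest)) := pvRep_append_left _ _ (by decide)
      have s4 : pvRep4 (pvV1 ++ (pvRep3 (pvRep2 (pvRep1 rest)))) = pvV1 ++ pvRep4 (pvRep3 (pvRep2 (pvRep1 rest))) := pvRep_append_left _ _ (by decide)
      have s5 : pvRep5 (pvV1 ++ (pvRep4 (pvRep3 (pvRep2 (pvRep1 rest))))) = pvV1 ++ pvRep5 (pvRep4 (pvRep3 (pvRep2 (pvRep1 rest)))) := pvRep_append_left _ _ (by decide)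
      rw [pvFuse_1 rest, ← ih rest hrl hno']
      simp only [pvA5]
      rw [s1, s2, s3, s4, s5]
    by_cases h2 : pvK2 <+: l
    · obtain ⟨rest, rfl⟩ := h2
      have hrl : rest.length ≤ n := by
        have h9 : (pvK2 ++ rest).length = 9 + rest.length := by
          rw [List.length_append, show pvK2.length = 9 from by decide]
        omega
      have hno' : ∀ o ∈ pvOverlaps, ¬ o.toList <:+: rest := fun o ho hin =>
        hno o ho (hin.trans (List.suffix_append pvK2 rest).isInfix)
      have b1 : ¬ pvQ1 <+: rest := pvOv_2_1 rest (hno _ (by simp [pvOverlaps]))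
      have s1 : pvRep1 (pvK2 ++ rest) = pvK2 ++ pvRep1 rest := pvSkip_1_2 rest b1
      have s2 : pvRep2 (pvK2 ++ (pvRep1 rest)) = pvV2 ++ pvRep2 (pvRep1 rest) := pvMatch_2 _
      have s3 : pvRep3 (pvV2 ++ (pvRep2 (pvRep1 rest))) = pvV2 ++ pvRep3 (pvRep2 (pvRep1 rest)) := pvRep_append_left _ _ (by decide)
      have s4 : pvRep4 (pvV2 ++ (pvRep3 (pvRep2 (pvRep1 rest)))) = pvV2 ++ pvRep4 (pvRep3 (pvRep2 (pvRep1 rest))) := pvRep_append_left _ _ (by decide)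
      have s5 : pvRep5 (pvV2 ++ (pvRep4 (pvRep3 (pvRep2 (pvRep1 rest))))) = pvV2 ++ pvRep5 (pvRep4 (pvRep3 (pvRep2 (pvRep1 rest)))) := pvRep_append_left _ _ (by decide)
      rw [pvFuse_2 rest, ← ih rest hrl hno']
      simp only [pvA5]
      rw [s1, s2, s3, s4, s5]
    by_cases h3 : pvK3 <+: l
    · obtain ⟨rest, rfl⟩ := h3
      have hrl : rest.length ≤ n := by
        have h9 : (pvK3 ++ rest).length = 9 + rest.length := by
          rw [List.length_append, show pvK3.length = 9 from by decide]
        omega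
      have hno' : ∀ o ∈ pvOverlaps, ¬ o.toList <:+: rest := fun o ho hin =>
        hno o ho (hin.trans (List.suffix_append pvK3 rest).isInfix)
      have b1 : ¬ pvQ1 <+: rest := pvOv_3_1 rest (hno _ (by simp [pvOverlaps]))
      have b2 : ¬ pvQ2 <+: rest := pvOv_3_2 rest (hno _ (by simp [pvOverlaps]))
      have s1 : pvRep1 (pvK3 ++ rest) = pvK3 ++ pvRep1 rest := pvSkip_1_3 rest b1
      have b2' : ¬ pvQ2 <+: pvRep1 rest := fun h' => b2 (pvPull1 (by decide) (by decide) (h'))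
      have s2 : pvRep2 (pvK3 ++ (pvRep1 rest)) = pvK3 ++ pvRep2 (pvRep1 rest) := pvSkip_2_3 _ b2'
      have s3 : pvRep3 (pvK3 ++ (pvRep2 (pvRep1 rest))) = pvV3 ++ pvRep3 (pvRep2 (pvRep1 rest)) := pvMatch_3 _
      have s4 : pvRep4 (pvV3 ++ (pvRep3 (pvRep2 (pvRep1 rest)))) = pvV3 ++ pvRep4 (pvRep3 (pvRep2 (pvRep1 rest))) := pvRep_append_left _ _ (by decide)
      have s5 : pvRep5 (pvV3 ++ (pvRep4 (pvRep3 (pvRep2 (pvRep1 rest))))) = pvV3 ++ pvRep5 (pvRep4 (pvRep3 (pvRep2 (pvRep1 rest)))) := pvRep_append_left _ _ (by decide)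
      rw [pvFuse_3 rest, ← ih rest hrl hno']
      simp only [pvA5]
      rw [s1, s2, s3, s4, s5]
    by_cases h4 : pvK4 <+: l
    · obtain ⟨rest, rfl⟩ := h4
      have hrl : rest.length ≤ n := by
        have h9 : (pvK4 ++ rest).length = 9 + rest.length := by
          rw [List.length_append, show pvK4.length = 9 from by decide]
        omega
      have hno' : ∀ o ∈ pvOverlaps, ¬ o.toList <:+: rest := fun o ho hin =>
        hno o ho (hin.trans (List.suffix_append pvK4 rest).isInfix)
      have b1 : ¬ pvQ1 <+: rest := pvOv_4_1 rest (hno _ (by simp [pvOverlaps]))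
      have b2 : ¬ pvQ2 <+: rest := pvOv_4_2 rest (hno _ (by simp [pvOverlaps]))
      have b3 : ¬ pvQ3 <+: rest := pvOv_4_3 rest (hno _ (by simp [pvOverlaps]))
      have s1 : pvRep1 (pvK4 ++ rest) = pvK4 ++ pvRep1 rest := pvSkip_1_4 rest b1
      have b2' : ¬ pvQ2 <+: pvRep1 rest := fun h' => b2 (pvPull1 (by decide) (by decide) (h'))
      have s2 : pvRep2 (pvK4 ++ (pvRep1 rest)) = pvK4 ++ pvRep2 (pvRep1 rest) := pvSkip_2_4 _ b2'
      have b3' : ¬ pvQ3 <+: pvRep2 (pvRep1 rest) := fun h' => b3 (pvPull1 (by decide) (by decide) (pvPull2 (by decide) (by decide) (h')))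
      have s3 : pvRep3 (pvK4 ++ (pvRep2 (pvRep1 rest))) = pvK4 ++ pvRep3 (pvRep2 (pvRep1 rest)) := pvSkip_3_4 _ b3'
      have s4 : pvRep4 (pvK4 ++ (pvRep3 (pvRep2 (pvRep1 rest)))) = pvV4 ++ pvRep4 (pvRep3 (pvRep2 (pvRep1 rest))) := pvMatch_4 _
      have s5 : pvRep5 (pvV4 ++ (pvRep4 (pvRep3 (pvRep2 (pvRep1 rest))))) = pvV4 ++ pvRep5 (pvRep4 (pvRep3 (pvRep2 (pvRep1 rest)))) := pvRep_append_left _ _ (by decide)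
      rw [pvFuse_4 rest, ← ih rest hrl hno']
      simp only [pvA5]
      rw [s1, s2, s3, s4, s5]
    by_cases h5 : pvK5 <+: l
    · obtain ⟨rest, rfl⟩ := h5
      have hrl : rest.length ≤ n := by
        have h9 : (pvK5 ++ rest).length = 9 + rest.length := by
          rw [List.length_append, show pvK5.length = 9 from by decide]
        omega
      have hno' : ∀ o ∈ pvOverlaps, ¬ o.toList <:+: rest := fun o ho hin =>
        hno o ho (hin.trans (List.suffix_append pvK5 rest).isInfix)
      have b1 : ¬ pvQ1 <+: rest := pvOv_5_1 rest (hno _ (by simp [pvOverlaps]))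
      have b2 : ¬ pvQ2 <+: rest := pvOv_5_2 rest (hno _ (by simp [pvOverlaps]))
      have b3 : ¬ pvQ3 <+: rest := pvOv_5_3 rest (hno _ (by simp [pvOverlaps]))
      have b4 : ¬ pvQ4 <+: rest := pvOv_5_4 rest (hno _ (by simp [pvOverlaps]))
      have s1 : pvRep1 (pvK5 ++ rest) = pvK5 ++ pvRep1 rest := pvSkip_1_5 rest b1
      have b2' : ¬ pvQ2 <+: pvRep1 rest := fun h' => b2 (pvPull1 (by decide) (by decide) (h'))
      have s2 : pvRep2 (pvK5 ++ (pvRep1 rest)) = pvK5 ++ pvRep2 (pvRep1 rest) := pvSkip_2_5 _ b2'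
      have b3' : ¬ pvQ3 <+: pvRep2 (pvRep1 rest) := fun h' => b3 (pvPull1 (by decide) (by decide) (pvPull2 (by decide) (by decide) (h')))
      have s3 : pvRep3 (pvK5 ++ (pvRep2 (pvRep1 rest))) = pvK5 ++ pvRep3 (pvRep2 (pvRep1 rest)) := pvSkip_3_5 _ b3'
      have b4' : ¬ pvQ4 <+: pvRep3 (pvRep2 (pvRep1 rest)) := fun h' => b4 (pvPull1 (by decide) (by decide) (pvPull2 (by decide) (by decide) (pvPull3 (by decide) (by decide) (h'))))
      have s4 : pvRep4 (pvK5 ++ (pvRep3 (pvRep2 (pvRep1 rest)))) = pvK5 ++ pvRep4 (pvRep3 (pvRep2 (pvRep1 rest))) := pvSkip_4_5 _ b4'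
      have s5 : pvRep5 (pvK5 ++ (pvRep4 (pvRep3 (pvRep2 (pvRep1 rest))))) = pvV5 ++ pvRep5 (pvRep4 (pvRep3 (pvRep2 (pvRep1 rest)))) := pvMatch_5 _
      rw [pvFuse_5 rest, ← ih rest hrl hno']
      simp only [pvA5]
      rw [s1, s2, s3, s4, s5]
    cases l with
    | nil => simp [pvA5, pvRep1, pvRep2, pvRep3, pvRep4, pvRep5, pvRep, fuseGo]
    | cons c t =>
      have e1 : pvRep1 (c :: t) = c :: pvRep1 t := pvRep_cons_neg (fun hp => h1 (by rw [pvKQ1]; exact hp))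
      have n2 : ¬ pvK2 <+: (c :: (pvRep1 t)) := fun hp => by
        have hp' : pvK2 <+: pvRep1 ((c :: t)) := by rw [e1]; exact hp
        exact h2 (pvPull1 (by decide) (by decide) (hp'))
      have e2 : pvRep2 (c :: (pvRep1 t)) = c :: pvRep2 (pvRep1 t) := pvRep_cons_neg (fun hp => n2 (by rw [pvKQ2]; exact hp))
      have n3 : ¬ pvK3 <+: (c :: (pvRep2 (pvRep1 t))) := fun hp => by
        have hp' : pvK3 <+: pvRep2 (pvRep1 ((c :: t))) := by rw [e1, e2]; exact hp
        exact h3 (pvPull1 (by decide) (by decide) (pvPull2 (by decide) (by decide) (hp')))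
      have e3 : pvRep3 (c :: (pvRep2 (pvRep1 t))) = c :: pvRep3 (pvRep2 (pvRep1 t)) := pvRep_cons_neg (fun hp => n3 (by rw [pvKQ3]; exact hp))
      have n4 : ¬ pvK4 <+: (c :: (pvRep3 (pvRep2 (pvRep1 t)))) := fun hp => by
        have hp' : pvK4 <+: pvRep3 (pvRep2 (pvRep1 ((c :: t)))) := by rw [e1, e2, e3]; exact hp
        exact h4 (pvPull1 (by decide) (by decide) (pvPull2 (by decide) (by decide) (pvPull3 (by decide) (by decide) (hp'))))
      have e4 : pvRep4 (c :: (pvRep3 (pvRep2 (pvRep1 t)))) = c :: pvRep4 (pvRep3 (pvRep2 (pvRep1 t))) := pvRep_cons_neg (fun hp => n4 (by rw [pvKQ4]; exact hp))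
      have n5 : ¬ pvK5 <+: (c :: (pvRep4 (pvRep3 (pvRep2 (pvRep1 t))))) := fun hp => by
        have hp' : pvK5 <+: pvRep4 (pvRep3 (pvRep2 (pvRep1 ((c :: t))))) := by rw [e1, e2, e3, e4]; exact hp
        exact h5 (pvPull1 (by decide) (by decide) (pvPull2 (by decide) (by decide) (pvPull3 (by decide) (by decide) (pvPull4 (by decide) (by decide) (hp')))))
      have e5 : pvRep5 (c :: (pvRep4 (pvRep3 (pvRep2 (pvRep1 t))))) = c :: pvRep5 (pvRep4 (pvRep3 (pvRep2 (pvRep1 t)))) := pvRep_cons_neg (fun hp => n5 (by rw [pvKQ5]; exact hp))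
      have htl : t.length ≤ n := by simp at hl; omega
      have hno' : ∀ o ∈ pvOverlaps, ¬ o.toList <:+: t := fun o ho hin =>
        hno o ho (hin.trans (List.suffix_cons c t).isInfix)
      rw [pvFuseMiss c t h1 h2 h3 h4 h5, ← ih t htl hno']
      simp only [pvA5]
      rw [e1, e2, e3, e4, e5]

-- ===== VERDICT (by name: the statement is the Claim_ definition above) =====
theorem color_replace_spec : Claim_equal_color_replace := by
  intro code _ hpre
  unfold Spec_color_replace
  have hno : ∀ o ∈ pvOverlaps, ¬ o.toList <:+: code.toList := by
    intro o ho hinf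
    have hfalse := hpre o ho
    rw [← PySem.Str.isIn_iff_infix] at hinf
    rw [hfalse] at hinf
    cases hinf
  have hmain := pvMain code.toList.length code.toList le_rfl hno
  have hA := portA_toList code
  unfold color_replace_alt
  rw [← hmain, ← hA, String.ofList_toList]
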